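-- pv_equiv track=rewrite | github.com/claudiosociasp/finanzas-personales-dashboard | src/recategorizar.py | categorizar
-- ===== SOURCE A (Python) =====
-- IGNORAR = [
--     "**************************************************",
--     "DESCRIPCIÓN",
--     "DETALLE DE MOVIMIENTOS",
--     "SALDOS DIARIOS",
-- ]
--
-- def categorizar(descripcion: str, reglas: list, fuente_filtro: str) -> tuple:
--     """
--     Retorna (categoria_padre, subcategoria).
--     Separadores se marcan como ignorar/separador para excluirlos del análisis.
--     Prioriza reglas específicas de la fuente sobre las de 'todas'.
--     """
--     desc_upper = str(descripcion).upper().strip()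
--
--     # Detectar separadores — se excluyen del análisis
--     if any(ig.upper() in desc_upper for ig in IGNORAR):
--         return "ignorar", "separador"
--
--     # Buscar coincidencia — primero fuente específica, luego 'todas'
--     for fuente_prio in [fuente_filtro, "todas"]:
--         for padre, sub, palabra, fuente in reglas:
--             if fuente == fuente_prio:
--                 if palabra.upper() in desc_upper:
--                     return padre, sub
--
--     return "otros", "sin_clasificar"
-- ===== SOURCE B (Python) =====
-- IGNORAR = [
--     "**************************************************",
--     "DESCRIPCIÓN",
--     "DETALLE DE MOVIMIENTOS",
--     "SALDOS DIARIOS",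
-- ]
--
-- def categorizar(descripcion: str, reglas: list, fuente_filtro: str) -> tuple:
--     """Single pass over reglas keeping two 'first match' slots (one per
--     priority level) instead of one scan per priority level."""
--     desc_upper = str(descripcion).upper().strip()
--
--     if any(ig.upper() in desc_upper for ig in IGNORAR):
--         return "ignorar", "separador"
--
--     match_fuente = None  # first matching rule with fuente == fuente_filtro
--     match_todas = None   # first matching rule with fuente == 'todas'
--     for padre, sub, palabra, fuente in reglas:
--         if palabra.upper() in desc_upper:
--             if match_fuente is None and fuente == fuente_filtro:
--                 match_fuente = (padre, sub)
--             if match_todas is None and fuente == "todas":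
--                 match_todas = (padre, sub)
--
--     if match_fuente is not None:
--         return match_fuente
--     if match_todas is not None:
--         return match_todas
--     return "otros", "sin_clasificar"
-- ===== Notes on version B (the rewrite author's own statement) =====
-- stated objective: alternative
-- what changed: Replaces A's nested loops (a full scan of reglas per priority level in [fuente_filtro,'todas']) by a single pass over reglas maintaining two first-match slots, choosing the fuente-specific slot over the 'todas' slot afterwards.
import Mathlib
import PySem

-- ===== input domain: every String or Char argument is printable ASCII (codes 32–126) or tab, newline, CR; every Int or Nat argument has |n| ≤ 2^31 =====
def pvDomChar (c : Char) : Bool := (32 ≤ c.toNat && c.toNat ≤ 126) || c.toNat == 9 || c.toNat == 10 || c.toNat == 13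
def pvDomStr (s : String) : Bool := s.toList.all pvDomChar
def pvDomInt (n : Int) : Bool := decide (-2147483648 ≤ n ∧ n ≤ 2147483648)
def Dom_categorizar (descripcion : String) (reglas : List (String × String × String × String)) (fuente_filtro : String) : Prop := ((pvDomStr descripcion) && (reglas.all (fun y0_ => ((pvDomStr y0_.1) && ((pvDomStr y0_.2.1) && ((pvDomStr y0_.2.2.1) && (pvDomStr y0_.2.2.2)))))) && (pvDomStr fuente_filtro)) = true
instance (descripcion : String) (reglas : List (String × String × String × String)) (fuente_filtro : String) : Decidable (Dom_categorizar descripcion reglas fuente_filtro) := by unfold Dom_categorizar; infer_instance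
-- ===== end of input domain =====

-- B replaces A's two passes over `reglas` (one per priority level) by one pass keeping two
-- first-match slots; same return value everywhere (objective: alternative decomposition).

def IGNORAR : List String :=
  ["**************************************************",
   "DESCRIPCIÓN",
   "DETALLE DE MOVIMIENTOS",
   "SALDOS DIARIOS"]

-- ===== PORT A =====
-- inner 'for padre, sub, palabra, fuente in reglas' loop of A, for one fuente_prio
def buscarA (descUpper : String) (fuentePrio : String) :
    List (String × String × String × String) → Option (String × String)
  | [] => none
  | (padre, sub, palabra, fuente) :: rest =>
    if fuente == fuentePrio then
      if PySem.Str.isIn (PySem.Str.upper palabra) descUpper then some (padre, sub)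
      else buscarA descUpper fuentePrio rest
    else buscarA descUpper fuentePrio rest

-- outer 'for fuente_prio in [fuente_filtro, "todas"]' loop of A
def prioLoopA (descUpper : String) (reglas : List (String × String × String × String)) :
    List String → String × String
  | [] => ("otros", "sin_clasificar")
  | fp :: rest =>
    match buscarA descUpper fp reglas with
    | some r => r
    | none => prioLoopA descUpper reglas rest

def categorizar (descripcion : String) (reglas : List (String × String × String × String)) (fuente_filtro : String) : String × String :=
  let descUpper := PySem.Str.strip (PySem.Str.upper descripcion)
  if IGNORAR.any (fun ig => PySem.Str.isIn (PySem.Str.upper ig) descUpper) then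
    ("ignorar", "separador")
  else
    prioLoopA descUpper reglas [fuente_filtro, "todas"]

-- ===== PORT B =====
-- one step of B's single pass: update the two first-match slots
def stepB (descUpper : String) (fuente_filtro : String)
    (st : Option (String × String) × Option (String × String))
    (r : String × String × String × String) :
    Option (String × String) × Option (String × String) :=
  let (padre, sub, palabra, fuente) := r
  if PySem.Str.isIn (PySem.Str.upper palabra) descUpper then
    ((if st.1.isNone && (fuente == fuente_filtro) then some (padre, sub) else st.1),
     (if st.2.isNone && (fuente == "todas") then some (padre, sub) else st.2))
  else st

def categorizar_alt (descripcion : String) (reglas : List (String × String × String × String)) (fuente_filtro : String) : String × String :=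
  let descUpper := PySem.Str.strip (PySem.Str.upper descripcion)
  if IGNORAR.any (fun ig => PySem.Str.isIn (PySem.Str.upper ig) descUpper) then
    ("ignorar", "separador")
  else
    let st := reglas.foldl (stepB descUpper fuente_filtro) (none, none)
    match st.1 with
    | some r => r
    | none =>
      match st.2 with
      | some r => r
      | none => ("otros", "sin_clasificar")

-- ===== PRECONDITION & SPEC =====
def Spec_categorizar (descripcion : String) (reglas : List (String × String × String × String)) (fuente_filtro : String) (out : String × String) : Prop := out = categorizar_alt descripcion reglas fuente_filtro
instance (descripcion : String) (reglas : List (String × String × String × String)) (fuente_filtro : String) (out : String × String) : Decidable (Spec_categorizar descripcion reglas fuente_filtro out) := by unfold Spec_categorizar; infer_instance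

-- ===== CLAIM (what is proved, stated in full; the proofs are below) =====
def Claim_equal_categorizar : Prop := ∀ (descripcion : String) (reglas : List (String × String × String × String)) (fuente_filtro : String), Dom_categorizar descripcion reglas fuente_filtro → Spec_categorizar descripcion reglas fuente_filtro (categorizar descripcion reglas fuente_filtro)

-- ===== LEMMAS AND PROOFS =====

-- the first slot of B's fold computes A's fuente_filtro-scan (once set it stays set)
theorem foldB_fst (du ff : String) (reglas : List (String × String × String × String)) :
    ∀ st : Option (String × String) × Option (String × String),
      (reglas.foldl (stepB du ff) st).1 =
        match st.1 with
        | some x => some x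
        | none => buscarA du ff reglas := by
  induction reglas with
  | nil => intro st; obtain ⟨s1, s2⟩ := st; cases s1 <;> rfl
  | cons r rest ih =>
    intro st
    obtain ⟨padre, sub, palabra, fuente⟩ := r
    simp only [List.foldl_cons, ih, stepB, buscarA]
    by_cases hin : PySem.Str.isIn (PySem.Str.upper palabra) du
    · simp only [hin, if_true]
      cases h1 : st.1 <;>
        by_cases hf : fuente == ff <;>
          simp_all
    · simp only [hin]
      cases h1 : st.1 <;> by_cases hf : fuente == ff <;> simp_all

-- the second slot of B's fold computes A's 'todas'-scan
theorem foldB_snd (du ff : String) (reglas : List (String × String × String × String)) :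
    ∀ st : Option (String × String) × Option (String × String),
      (reglas.foldl (stepB du ff) st).2 =
        match st.2 with
        | some x => some x
        | none => buscarA du "todas" reglas := by
  induction reglas with
  | nil => intro st; obtain ⟨s1, s2⟩ := st; cases s2 <;> rfl
  | cons r rest ih =>
    intro st
    obtain ⟨padre, sub, palabra, fuente⟩ := r
    simp only [List.foldl_cons, ih, stepB, buscarA]
    by_cases hin : PySem.Str.isIn (PySem.Str.upper palabra) du
    · simp only [hin, if_true]
      cases h2 : st.2 <;>
        by_cases hf : fuente == ("todas" : String) <;>
          simp_all
    · simp only [hin]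
      cases h2 : st.2 <;> by_cases hf : fuente == ("todas" : String) <;> simp_all

-- ===== VERDICT (by name: the statement is the Claim_ definition above) =====
theorem categorizar_spec : Claim_equal_categorizar := by
  intro descripcion reglas fuente_filtro _
  unfold Spec_categorizar categorizar categorizar_alt
  simp only
  split
  · rfl
  · rw [foldB_fst (PySem.Str.strip (PySem.Str.upper descripcion)) fuente_filtro reglas,
        foldB_snd (PySem.Str.strip (PySem.Str.upper descripcion)) fuente_filtro reglas]
    simp only [prioLoopA]
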